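-- pv_equiv track=rewrite | github.com/stuartamitchell/just-in-time-report-generator | jitrgen/reports.py | __create_totals
-- ===== SOURCE A (Python) =====
-- def __create_totals(labels, totals):
--     '''
--     creates a list of tuples (label, total)
--
--     Parameters
--     ----------
--     labels : list
--         a list of labels for the tuple
--
--     totals : list
--         a list of totals for the tuple
--
--     Returns
--     -------
--     list
--         a list of tuples of the form (label, total)
--     '''
--     set_labels = list(set(labels))
--     set_labels.sort()
--
--     label_totals = list(zip(labels, totals))
--
--     totals = []
--
--     for label in set_labels:
--         total = sum([t[1] for t in label_totals if t[0] == label])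
--         totals.append(total)
--
--     return totals
-- ===== SOURCE B (Python) =====
-- def __create_totals(labels, totals):
--     sums = {}
--     for label, total in zip(labels, totals):
--         sums[label] = sums.get(label, 0) + total
--     return [sums.get(label, 0) for label in sorted(set(labels))]
-- ===== Notes on version B (the rewrite author's own statement) =====
-- stated objective: faster
-- what changed: replaces A's per-unique-label rescan of all (label,total) pairs with a single dict-aggregation pass, then one lookup per sorted unique label
import Mathlib
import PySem

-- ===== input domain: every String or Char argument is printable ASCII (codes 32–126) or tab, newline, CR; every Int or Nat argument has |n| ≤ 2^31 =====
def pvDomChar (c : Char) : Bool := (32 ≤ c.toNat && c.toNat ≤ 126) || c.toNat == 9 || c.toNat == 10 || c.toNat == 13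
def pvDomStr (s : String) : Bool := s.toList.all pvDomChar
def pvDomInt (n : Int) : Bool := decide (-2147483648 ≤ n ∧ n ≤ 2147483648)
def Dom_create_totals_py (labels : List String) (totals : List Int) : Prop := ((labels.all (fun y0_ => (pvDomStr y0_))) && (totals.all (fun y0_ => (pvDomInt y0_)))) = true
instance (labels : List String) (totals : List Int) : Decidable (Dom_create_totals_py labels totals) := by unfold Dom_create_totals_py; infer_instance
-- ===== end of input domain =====

-- B replaces A's per-unique-label rescan of all pairs with one dict-aggregation pass (faster in a timing run's mechanism: asymptotic).


-- ===== PORT A =====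
def create_totals_py (labels : List String) (totals : List Int) : List Int :=
  let set_labels := PySem.List.sorted (PySem.Set.ofList labels) (fun x => x) false
  let label_totals := labels.zip totals
  set_labels.foldl
    (fun acc label =>
      acc ++ [((label_totals.filter (fun t => t.1 == label)).map (fun t => t.2)).sum])
    []

-- ===== PORT B =====
def create_totals_py_alt (labels : List String) (totals : List Int) : List Int :=
  let sums := (labels.zip totals).foldl
    (fun d (p : String × Int) => d.insert p.1 (d.getD p.1 0 + p.2)) PySem.Dict.empty
  (PySem.List.sorted (PySem.Set.ofList labels) (fun x => x) false).map
    (fun label => sums.getD label 0)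

-- ===== PRECONDITION & SPEC =====
def Spec_create_totals_py (labels : List String) (totals : List Int) (out : List Int) : Prop := out = create_totals_py_alt labels totals
instance (labels : List String) (totals : List Int) (out : List Int) : Decidable (Spec_create_totals_py labels totals out) := by unfold Spec_create_totals_py; infer_instance

-- ===== CLAIM (what is proved, stated in full; the proofs are below) =====
def Claim_equal_create_totals_py : Prop := ∀ (labels : List String) (totals : List Int), Dom_create_totals_py labels totals → Spec_create_totals_py labels totals (create_totals_py labels totals)

-- ===== LEMMAS AND PROOFS =====

-- the dict built by B's aggregation loop holds, at each key, the sum A computes for it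
theorem getD_sum_loop (pairs : List (String × Int)) (d : PySem.Dict String Int) (k : String) :
    (pairs.foldl (fun d (p : String × Int) => d.insert p.1 (d.getD p.1 0 + p.2)) d).getD k 0
      = d.getD k 0 + ((pairs.filter (fun t => t.1 == k)).map (fun t => t.2)).sum := by
  induction pairs generalizing d with
  | nil => simp
  | cons p rest ih =>
    simp only [List.foldl_cons, List.filter_cons]
    rw [ih]
    by_cases h : p.1 = k
    · simp [h]
      ring
    · rw [PySem.Dict.getD_insert, if_neg (fun he => h he.symm)]
      simp [h]

theorem create_totals_py_spec : Claim_equal_create_totals_py := by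
  intro labels totals _
  unfold Spec_create_totals_py create_totals_py create_totals_py_alt
  rw [PySem.List.foldl_append_singleton_eq_map]
  apply List.map_congr_left
  intro label _
  rw [getD_sum_loop]
  simp
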